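-- pv_equiv track=rewrite | github.com/JacopoMaster/Advent_of_code_2024 | Day 09/day09.py | find_free_spans
-- ===== SOURCE A (Python) =====
-- def find_free_spans(disk):
--     free_spans = []
--     in_free = False
--     start_free = None
--     for i, ch in enumerate(disk):
--         if ch == '.' and not in_free:
--             in_free = True
--             start_free = i
--         elif ch != '.' and in_free:
--             free_spans.append((start_free, i - 1))
--             in_free = False
--     if in_free:
--         free_spans.append((start_free, len(disk) - 1))
--     return free_spans
-- ===== SOURCE B (Python) =====
-- def find_free_spans(disk):
--     spans = []
--     i = 0
--     n = len(disk)
--     while i < n: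
--         j = i
--         while j < n and disk[j] == disk[i]:
--             j += 1
--         if disk[i] == '.':
--             spans.append((i, j - 1))
--         i = j
--     return spans
-- ===== Notes on version B (the rewrite author's own statement) =====
-- stated objective: alternative
-- what changed: Replaces A's in_free/start_free flag state machine with a run-grouping two-index scan: an inner scan finds each maximal run of equal characters at once and dot runs are emitted directly as (start, end).
import Mathlib
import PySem

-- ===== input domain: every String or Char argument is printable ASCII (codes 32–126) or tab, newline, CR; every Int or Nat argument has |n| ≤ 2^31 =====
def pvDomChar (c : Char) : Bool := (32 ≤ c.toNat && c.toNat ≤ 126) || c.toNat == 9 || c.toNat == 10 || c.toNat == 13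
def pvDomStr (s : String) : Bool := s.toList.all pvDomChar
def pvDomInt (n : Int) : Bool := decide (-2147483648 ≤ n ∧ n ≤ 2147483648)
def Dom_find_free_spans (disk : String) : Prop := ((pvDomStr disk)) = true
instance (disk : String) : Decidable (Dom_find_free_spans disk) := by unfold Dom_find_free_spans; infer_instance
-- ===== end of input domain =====

-- B replaces A's in_free/start_free flag state machine with a run-grouping two-index scan
-- (each maximal run of equal characters is consumed at once); same cost, different decomposition.

-- ===== PORT A =====
-- loop state: (free_spans, in_free, start_free); start_free = none models Python's None
def aLoop : List Char → Int → List (Int × Int) → Bool → Option Int →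
    (List (Int × Int) × Bool × Option Int)
  | [], _, spans, inf, st => (spans, inf, st)
  | ch :: rest, i, spans, inf, st =>
    if ch = '.' ∧ inf = false then
      aLoop rest (i + 1) spans true (some i)
    else if ch ≠ '.' ∧ inf = true then
      aLoop rest (i + 1) (spans ++ [(st.getD 0, i - 1)]) false st
    else
      aLoop rest (i + 1) spans inf st

def find_free_spans (disk : String) : List (Int × Int) :=
  let l := disk.toList
  let r := aLoop l 0 [] false none
  if r.2.1 then r.1 ++ [(r.2.2.getD 0, (l.length : Int) - 1)] else r.1

-- ===== PORT B =====
-- the inner 'while' of Source B that scans past a run is takeWhile/dropWhile of the run's character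
def bLoop : List Char → Int → List (Int × Int)
  | [], _ => []
  | c :: rest, i =>
    let len : Int := (rest.takeWhile (· == c)).length + 1
    (if c = '.' then [(i, i + len - 1)] else []) ++ bLoop (rest.dropWhile (· == c)) (i + len)
termination_by l _ => l.length
decreasing_by
  simp only [List.length_cons]
  exact Nat.lt_succ_of_le (List.length_dropWhile_le _ _)

def find_free_spans_alt (disk : String) : List (Int × Int) :=
  bLoop disk.toList 0

-- ===== PRECONDITION & SPEC =====
def Spec_find_free_spans (disk : String) (out : List (Int × Int)) : Prop := out = find_free_spans_alt disk
instance (disk : String) (out : List (Int × Int)) : Decidable (Spec_find_free_spans disk out) := by unfold Spec_find_free_spans; infer_instance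

-- ===== CLAIM (what is proved, stated in full; the proofs are below) =====
def Claim_equal_find_free_spans : Prop := ∀ (disk : String), Dom_find_free_spans disk → Spec_find_free_spans disk (find_free_spans disk)

-- ===== LEMMAS AND PROOFS =====

-- reference spec: A's state machine written as a pure structural recursion (state = optional run start)
def S : List Char → Int → Option Int → List (Int × Int)
  | [], _, none => []
  | [], i, some s => [(s, i - 1)]
  | c :: rest, i, none => if c = '.' then S rest (i + 1) (some i) else S rest (i + 1) none
  | c :: rest, i, some s =>
    if c = '.' then S rest (i + 1) (some s) else (s, i - 1) :: S rest (i + 1) none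

def finA (r : List (Int × Int) × Bool × Option Int) (j : Int) : List (Int × Int) :=
  if r.2.1 then r.1 ++ [(r.2.2.getD 0, j - 1)] else r.1

lemma aLoop_spec : ∀ (l : List Char) (i : Int) (spans : List (Int × Int)) (b : Bool)
    (ost : Option Int), (b = true → ost.isSome) →
    finA (aLoop l i spans b ost) (i + l.length) =
      spans ++ S l i (if b then ost else none) := by
  intro l
  induction l with
  | nil =>
    intro i spans b ost h
    cases b with
    | false => simp [aLoop, finA, S]
    | true =>
      obtain ⟨s, hs⟩ := Option.isSome_iff_exists.mp (h rfl)
      subst hs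
      simp [aLoop, finA, S]
  | cons c rest ih =>
    intro i spans b ost h
    have hlen : i + (((c :: rest).length : Nat) : Int) = (i + 1) + (rest.length : Int) := by
      simp only [List.length_cons]; push_cast; ring
    simp only [aLoop]
    by_cases hc : c = '.'
    · cases b with
      | false =>
        rw [if_pos ⟨hc, rfl⟩, hlen, ih (i + 1) spans true (some i) (by simp)]
        simp [S, hc]
      | true =>
        obtain ⟨s, hs⟩ := Option.isSome_iff_exists.mp (h rfl)
        subst hs
        rw [if_neg (by simp), if_neg (by simp [hc]), hlen,
          ih (i + 1) spans true (some s) (by simp)]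
        simp [S, hc]
    · cases b with
      | false =>
        rw [if_neg (by simp [hc]), if_neg (by simp), hlen,
          ih (i + 1) spans false ost (by simp)]
        simp [S, hc]
      | true =>
        obtain ⟨s, hs⟩ := Option.isSome_iff_exists.mp (h rfl)
        subst hs
        rw [if_neg (by simp [hc]), if_pos ⟨hc, rfl⟩, hlen]
        rw [show ((some s).getD 0 : Int) = s from rfl]
        rw [ih (i + 1) (spans ++ [(s, i - 1)]) false (some s) (by simp)]
        simp [S, hc]

-- S ignores a run of non-dot characters
lemma S_skip_nondot : ∀ (n : Nat) (c : Char), c ≠ '.' → ∀ (l : List Char) (i : Int),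
    S (List.replicate n c ++ l) i none = S l (i + n) none := by
  intro n
  induction n with
  | zero => intro c _ l i; simp
  | succ m ih =>
    intro c hc l i
    simp only [List.replicate_succ, List.cons_append, S, if_neg hc]
    rw [ih c hc l (i + 1)]
    congr 1
    push_cast
    ring

-- S stays in the open state across a run of dots
lemma S_skip_dot : ∀ (n : Nat) (l : List Char) (i s : Int),
    S (List.replicate n '.' ++ l) i (some s) = S l (i + n) (some s) := by
  intro n
  induction n with
  | zero => intro l i s; simp
  | succ m ih =>
    intro l i s
    simp only [List.replicate_succ, List.cons_append, S, if_pos trivial]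
    rw [ih l (i + 1) s]
    congr 1
    push_cast
    ring

-- closing an open span when the next character (if any) is not a dot
lemma S_close (l : List Char) (i s : Int) (h : ∀ c, l.head? = some c → c ≠ '.') :
    S l i (some s) = (s, i - 1) :: S l i none := by
  cases l with
  | nil => simp [S]
  | cons c rest =>
    have hc : c ≠ '.' := h c rfl
    simp [S, if_neg hc]

lemma takeWhile_eq_replicate (c : Char) (l : List Char) :
    l.takeWhile (· == c) = List.replicate (l.takeWhile (· == c)).length c := by
  apply List.eq_replicate_of_mem
  intro x hx
  have hpx := List.mem_takeWhile_imp hx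
  simpa using hpx

lemma head?_dropWhile : ∀ (l : List Char) (c x : Char),
    (l.dropWhile (· == c)).head? = some x → x ≠ c := by
  intro l
  induction l with
  | nil => intro c x hx; simp [List.dropWhile] at hx
  | cons a rest ih =>
    intro c x hx
    by_cases hac : a = c
    · rw [List.dropWhile_cons_of_pos (by simp [hac])] at hx
      exact ih c x hx
    · rw [List.dropWhile_cons_of_neg (by simp [hac])] at hx
      simp at hx
      subst hx
      exact hac

lemma bLoop_eq_S : ∀ (n : Nat) (l : List Char), l.length ≤ n → ∀ (i : Int),
    bLoop l i = S l i none := by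
  intro n
  induction n with
  | zero =>
    intro l hl i
    have : l = [] := List.eq_nil_of_length_eq_zero (Nat.le_zero.mp hl)
    subst this
    simp [bLoop, S]
  | succ m ih =>
    intro l hl i
    cases l with
    | nil => simp [bLoop, S]
    | cons c rest =>
      have hdlen : (rest.dropWhile (· == c)).length ≤ m := by
        have h1 := List.length_dropWhile_le (· == c) rest
        have h2 : rest.length ≤ m := by
          simpa using Nat.lt_succ_iff.mp (Nat.lt_of_lt_of_le (by simp) hl)
        omega
      have hrep : rest = List.replicate (rest.takeWhile (· == c)).length c
          ++ rest.dropWhile (· == c) := by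
        conv_lhs => rw [← List.takeWhile_append_dropWhile (p := (· == c)) (l := rest)]
        rw [← takeWhile_eq_replicate]
      simp only [bLoop]
      rw [ih (rest.dropWhile (· == c)) hdlen]
      by_cases hc : c = '.'
      · subst hc
        have hS : S ('.' :: rest) i none = S rest (i + 1) (some i) := by simp [S]
        rw [hS]
        conv_rhs => rw [hrep]
        rw [S_skip_dot]
        rw [S_close (rest.dropWhile (· == '.')) (i + 1 + (rest.takeWhile (· == '.')).length) i
          (fun x hx => head?_dropWhile rest '.' x hx)]
        rw [if_pos rfl]
        have e1 : i + (((rest.takeWhile (· == '.')).length : Int) + 1)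
            = i + 1 + (rest.takeWhile (· == '.')).length := by ring
        rw [e1]
        simp
      · have hS : S (c :: rest) i none = S rest (i + 1) none := by simp [S, if_neg hc]
        rw [hS]
        conv_rhs => rw [hrep]
        rw [S_skip_nondot _ c hc]
        rw [if_neg hc]
        have e1 : i + (((rest.takeWhile (· == c)).length : Int) + 1)
            = i + 1 + (rest.takeWhile (· == c)).length := by ring
        rw [e1]
        simp

-- ===== VERDICT (by name: the statement is the Claim_ definition above) =====
theorem find_free_spans_spec : Claim_equal_find_free_spans := by
  intro disk _
  unfold Spec_find_free_spans find_free_spans find_free_spans_alt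
  have h := aLoop_spec disk.toList 0 [] false none (by simp)
  simp only [finA, Bool.false_eq_true] at h
  have h0 : (0 : Int) + (disk.toList.length : Int) = (disk.toList.length : Int) := by ring
  rw [h0] at h
  rw [bLoop_eq_S disk.toList.length disk.toList le_rfl 0]
  simpa [finA] using h
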